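/-
  RFC 8259 (The JavaScript Object Notation Data Interchange Format), AS A LEAN DEFINITION.   Bytes are `UInt8`; imports Lean core only.

  * `Json.Value`: the abstract syntax (the parse tree). A number carries its TEXT and a string its raw BODY (the bytes between the quotes,
    escapes not decoded): a tokenizer such as jsmn does not interpret them.
  * `IsNumber`, `IsStringBody`, `IsWs`: §6, §7 and the `ws` of §2, as predicates on byte lists (`Bool` checkers with their specifications: Json/GrammarCheck.lean).
  * `Json.Layout`: the CONCRETE syntax tree = a value together with the insignificant whitespace of one particular rendering.
    `Layout.text` is the rendering, `Layout.value` forgets the whitespace.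
  * `Prints v text`: "`text` is a JSON text (§2: `ws value ws`) whose value is `v`" = some layout of `v` renders to `text`.

  WHERE WHITESPACE MAY STAND. §2 puts it around the six structural characters (`begin-array = ws [ ws`, `value-separator = ws , ws` …) and around
  the top-level value. The same language, written without overlap (this is the grammar of json.org / ECMA-404): a value has NO surrounding
  whitespace; an element is `ws value ws`; an array is `[ ws ]` or `[ element , … , element ]`; a member is `ws string ws : element`;
  an object is `{ ws }` or `{ member , … , member }`; a JSON text is an element. `Layout` is that grammar. (An array or object layout
  carries a whitespace field directly after `[` / `{`, in front of its elements: for an empty array it is THE whitespace; for a non-empty one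
  it merely precedes the first element's own leading whitespace. So a text with whitespace there has several layouts, which differ only in
  how that whitespace is split; the expected tokens are the same for all of them: `Jsmn.tokens_unique`, Json/Jsmn/CorrectMain.lean.)
-/
namespace Json

/-- A JSON value (RFC 8259 §3). -/
inductive Value : Type
  | null
  | true
  | false
  /-- a number, as its text, e.g. `-1.5E-10` -/
  | number (text : List UInt8)
  /-- a string, as the bytes between its quotes, e.g. `a\"b\n` -/
  | string (body : List UInt8)
  | array (items : List Value)
  /-- an object: its members (key body, value) in order; duplicate keys allowed (§4: "names SHOULD be unique") -/
  | object (members : List (List UInt8 × Value))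

/-! ### Characters -/

/-- `ws`: space, tab, line feed, carriage return (§2). -/
def isWsChar (c : UInt8) : Bool := c.toNat == 0x20 || c.toNat == 0x09 || c.toNat == 0x0a || c.toNat == 0x0d
/-- DIGIT `0`–`9`. -/
def isDigit (c : UInt8) : Bool := 0x30 ≤ c.toNat && c.toNat ≤ 0x39
/-- digit1-9. -/
def isDigit19 (c : UInt8) : Bool := 0x31 ≤ c.toNat && c.toNat ≤ 0x39
/-- HEXDIG, either case (§7). -/
def isHexDigit (c : UInt8) : Bool :=
  (0x30 ≤ c.toNat && c.toNat ≤ 0x39) || (0x41 ≤ c.toNat && c.toNat ≤ 0x46) || (0x61 ≤ c.toNat && c.toNat ≤ 0x66)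
/-- The single characters allowed after a backslash: `"` `\` `/` `b` `f` `n` `r` `t` (§7). -/
def isEscapeChar (c : UInt8) : Bool :=
  c.toNat == 0x22 || c.toNat == 0x5c || c.toNat == 0x2f || c.toNat == 0x62 || c.toNat == 0x66 || c.toNat == 0x6e || c.toNat == 0x72 || c.toNat == 0x74
/-- `unescaped = %x20-21 / %x23-5B / %x5D-10FFFF` (§7), on bytes: everything from 20H on except `"` and `\` (a byte ≥ 80H is part of the
UTF-8 encoding of a code point above 7FH; all of those are allowed). -/
def isUnescaped (c : UInt8) : Bool := 0x20 ≤ c.toNat && c.toNat != 0x22 && c.toNat != 0x5c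

/-- Insignificant whitespace: any sequence of the four whitespace characters. -/
def IsWs (w : List UInt8) : Prop := ∀ c ∈ w, isWsChar c = true
/-- The checker of `IsWs`. -/
def isWs (w : List UInt8) : Bool := w.all isWsChar
theorem isWs_iff (w : List UInt8) : isWs w = true ↔ IsWs w := by simp [isWs, IsWs]
instance (w : List UInt8) : Decidable (IsWs w) := decidable_of_iff _ (isWs_iff w)

/-! ### Numbers (§6): `number = [ minus ] int [ frac ] [ exp ]` -/

/-- `1*DIGIT`. -/
def IsDigits (d : List UInt8) : Prop := d ≠ [] ∧ ∀ c ∈ d, isDigit c = true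
/-- `int = zero / ( digit1-9 *DIGIT )`. -/
def IsInt (t : List UInt8) : Prop := t = [0x30] ∨ ∃ c d, t = c :: d ∧ isDigit19 c = true ∧ ∀ x ∈ d, isDigit x = true
/-- `frac = decimal-point 1*DIGIT`. -/
def IsFrac (t : List UInt8) : Prop := ∃ d, t = 0x2e :: d ∧ IsDigits d
/-- `exp = e [ minus / plus ] 1*DIGIT` (`e` in either case). -/
def IsExp (t : List UInt8) : Prop :=
  ∃ e sign d, t = e :: sign ++ d ∧ (e = 0x65 ∨ e = 0x45) ∧ (sign = [] ∨ sign = [0x2b] ∨ sign = [0x2d]) ∧ IsDigits d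
/-- **A JSON number.** -/
def IsNumber (t : List UInt8) : Prop :=
  ∃ minus int frac exp, t = minus ++ int ++ frac ++ exp ∧ (minus = [] ∨ minus = [0x2d]) ∧ IsInt int ∧ (frac = [] ∨ IsFrac frac) ∧ (exp = [] ∨ IsExp exp)

/-! ### Strings (§7): `string = quotation-mark *char quotation-mark`; here: the `*char` part -/

/-- **The body of a JSON string**: unescaped bytes and the escapes `\" \\ \/ \b \f \n \r \t \uXXXX`. -/
inductive IsStringBody : List UInt8 → Prop
  | nil : IsStringBody []
  | unescaped (c : UInt8) (rest : List UInt8) : isUnescaped c = true → IsStringBody rest → IsStringBody (c :: rest)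
  | escape (e : UInt8) (rest : List UInt8) : isEscapeChar e = true → IsStringBody rest → IsStringBody (0x5c :: e :: rest)
  | unicode (h1 h2 h3 h4 : UInt8) (rest : List UInt8) :
      isHexDigit h1 = true → isHexDigit h2 = true → isHexDigit h3 = true → isHexDigit h4 = true → IsStringBody rest →
      IsStringBody (0x5c :: 0x75 :: h1 :: h2 :: h3 :: h4 :: rest)

/-- The checker of `IsStringBody`. -/
def isStringBody : List UInt8 → Bool
  | [] => true
  | c :: rest =>
    if c.toNat == 0x5c then
      match rest with
      | e :: rest' =>
        if isEscapeChar e then isStringBody rest'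
        else if e.toNat == 0x75 then
          match rest' with
          | h1 :: h2 :: h3 :: h4 :: rest'' => isHexDigit h1 && isHexDigit h2 && isHexDigit h3 && isHexDigit h4 && isStringBody rest''
          | _ => false
        else false
      | [] => false
    else isUnescaped c && isStringBody rest

/-! ### Well-formed values, and their size -/

mutual
/-- Every number in the value is a number, every string and every key a string body. -/
def Value.WellFormed : Value → Prop
  | .number t => IsNumber t
  | .string b => IsStringBody b
  | .array items => WellFormedList items
  | .object members => WellFormedMembers members
  | _ => True
/-- `WellFormed` for the items of an array. -/
def WellFormedList : List Value → Prop
  | [] => True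
  | v :: vs => v.WellFormed ∧ WellFormedList vs
/-- `WellFormed` for the members of an object. -/
def WellFormedMembers : List (List UInt8 × Value) → Prop
  | [] => True
  | (k, v) :: ms => IsStringBody k ∧ v.WellFormed ∧ WellFormedMembers ms
end

mutual
/-- **The number of tokens of a value**: its nodes, every key of an object counted as one more. -/
def Value.count : Value → Nat
  | .array items => 1 + countList items
  | .object members => 1 + countMembers members
  | _ => 1
/-- `count` summed over the items of an array. -/
def countList : List Value → Nat
  | [] => 0
  | v :: vs => v.count + countList vs
/-- `count` summed over the members of an object: one for the key, and the value's. -/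
def countMembers : List (List UInt8 × Value) → Nat
  | [] => 0
  | (_, v) :: ms => 1 + v.count + countMembers ms
end

/-! ### Layouts: a value with its whitespace -/

mutual
/-- **A concrete syntax tree**: a value (no whitespace around it) with the whitespace inside it. -/
inductive Layout : Type
  | null
  | true
  | false
  | number (text : List UInt8)
  | string (body : List UInt8)
  /-- `[` ws elements `]` -/
  | array (ws : List UInt8) (items : Items)
  /-- `{` ws members `}` -/
  | object (ws : List UInt8) (members : Members)
/-- The elements of an array: each is `ws value ws`; commas between them. -/
inductive Items : Type
  | nil
  | cons (pre : List UInt8) (item : Layout) (post : List UInt8) (rest : Items)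
/-- The members of an object: each is `ws "key" ws : ws value ws`; commas between them. -/
inductive Members : Type
  | nil
  | cons (pre : List UInt8) (key : List UInt8) (mid : List UInt8) (pre' : List UInt8) (val : Layout) (post : List UInt8) (rest : Members)
end

mutual
/-- **The rendering of a layout.** -/
def Layout.text : Layout → List UInt8
  | .null => [0x6e, 0x75, 0x6c, 0x6c]
  | .true => [0x74, 0x72, 0x75, 0x65]
  | .false => [0x66, 0x61, 0x6c, 0x73, 0x65]
  | .number t => t
  | .string b => 0x22 :: b ++ [0x22]
  | .array ws items => 0x5b :: ws ++ items.text ++ [0x5d]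
  | .object ws members => 0x7b :: ws ++ members.text ++ [0x7d]
/-- Elements, separated by commas. -/
def Items.text : Items → List UInt8
  | .nil => []
  | .cons pre item post rest => pre ++ item.text ++ post ++ rest.tail
/-- Further elements, each preceded by a comma. -/
def Items.tail : Items → List UInt8
  | .nil => []
  | .cons pre item post rest => 0x2c :: pre ++ item.text ++ post ++ rest.tail
/-- Members, separated by commas. -/
def Members.text : Members → List UInt8
  | .nil => []
  | .cons pre key mid pre' val post rest => pre ++ 0x22 :: key ++ 0x22 :: mid ++ 0x3a :: pre' ++ val.text ++ post ++ rest.tail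
/-- Further members, each preceded by a comma. -/
def Members.tail : Members → List UInt8
  | .nil => []
  | .cons pre key mid pre' val post rest => 0x2c :: pre ++ 0x22 :: key ++ 0x22 :: mid ++ 0x3a :: pre' ++ val.text ++ post ++ rest.tail
end

mutual
/-- The value of a layout: forget the whitespace. -/
def Layout.value : Layout → Value
  | .null => .null
  | .true => .true
  | .false => .false
  | .number t => .number t
  | .string b => .string b
  | .array _ items => .array items.values
  | .object _ members => .object members.values
/-- The values of the elements. -/
def Items.values : Items → List Value
  | .nil => []
  | .cons _ item _ rest => item.value :: rest.values
/-- The (key, value) pairs of the members. -/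
def Members.values : Members → List (List UInt8 × Value)
  | .nil => []
  | .cons _ key _ _ val _ rest => (key, val.value) :: rest.values
end

mutual
/-- All the whitespace of the layout is whitespace. -/
def Layout.WsOk : Layout → Prop
  | .array ws items => IsWs ws ∧ items.WsOk
  | .object ws members => IsWs ws ∧ members.WsOk
  | _ => True
/-- `WsOk` for elements. -/
def Items.WsOk : Items → Prop
  | .nil => True
  | .cons pre item post rest => IsWs pre ∧ item.WsOk ∧ IsWs post ∧ rest.WsOk
/-- `WsOk` for members. -/
def Members.WsOk : Members → Prop
  | .nil => True
  | .cons pre _ mid pre' val post rest => IsWs pre ∧ IsWs mid ∧ IsWs pre' ∧ val.WsOk ∧ IsWs post ∧ rest.WsOk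
end

mutual
/-- The number of tokens of a layout (= `Value.count` of its value: `Layout.count_value`). -/
def Layout.count : Layout → Nat
  | .array _ items => 1 + items.count
  | .object _ members => 1 + members.count
  | _ => 1
/-- `count` summed over the elements. -/
def Items.count : Items → Nat
  | .nil => 0
  | .cons _ item _ rest => item.count + rest.count
/-- `count` summed over the members: one for the key, and the value's. -/
def Members.count : Members → Nat
  | .nil => 0
  | .cons _ _ _ _ val _ rest => 1 + val.count + rest.count
end

/-- The number of elements. -/
def Items.length : Items → Nat
  | .nil => 0
  | .cons _ _ _ rest => 1 + rest.length
/-- The number of members. -/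
def Members.length : Members → Nat
  | .nil => 0
  | .cons _ _ _ _ _ _ rest => 1 + rest.length

mutual
/-- A layout all of whose whitespace is whitespace, numbers numbers, strings and keys string bodies (= `WsOk` and the value `WellFormed`:
`Layout.wellFormed_iff`). -/
def Layout.WellFormed : Layout → Prop
  | .number t => IsNumber t
  | .string b => IsStringBody b
  | .array ws items => IsWs ws ∧ items.WellFormed
  | .object ws members => IsWs ws ∧ members.WellFormed
  | _ => True
/-- `WellFormed` for elements. -/
def Items.WellFormed : Items → Prop
  | .nil => True
  | .cons pre item post rest => IsWs pre ∧ item.WellFormed ∧ IsWs post ∧ rest.WellFormed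
/-- `WellFormed` for members. -/
def Members.WellFormed : Members → Prop
  | .nil => True
  | .cons pre key mid pre' val post rest => IsWs pre ∧ IsStringBody key ∧ IsWs mid ∧ IsWs pre' ∧ val.WellFormed ∧ IsWs post ∧ rest.WellFormed
end

mutual
theorem Layout.count_value : (l : Layout) → l.value.count = l.count
  | .null | .true | .false | .number _ | .string _ => rfl
  | .array _ items => by simp [Layout.value, Value.count, Layout.count, Items.count_values items]
  | .object _ members => by simp [Layout.value, Value.count, Layout.count, Members.count_values members]
theorem Items.count_values : (is : Items) → countList is.values = is.count
  | .nil => rfl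
  | .cons _ item _ rest => by simp [Items.values, countList, Items.count, Layout.count_value item, Items.count_values rest]
theorem Members.count_values : (ms : Members) → countMembers ms.values = ms.count
  | .nil => rfl
  | .cons _ _ _ _ val _ rest => by simp [Members.values, countMembers, Members.count, Layout.count_value val, Members.count_values rest]
end

mutual
theorem Layout.wellFormed_iff : (l : Layout) → (l.WellFormed ↔ l.WsOk ∧ l.value.WellFormed)
  | .null | .true | .false => by simp [Layout.WellFormed, Layout.WsOk, Layout.value, Value.WellFormed]
  | .number _ | .string _ => by simp [Layout.WellFormed, Layout.WsOk, Layout.value, Value.WellFormed]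
  | .array _ items => by
    simp only [Layout.WellFormed, Layout.WsOk, Layout.value, Value.WellFormed, Items.wellFormed_iff items]; constructor <;> intro h <;> simp_all
  | .object _ members => by
    simp only [Layout.WellFormed, Layout.WsOk, Layout.value, Value.WellFormed, Members.wellFormed_iff members]; constructor <;> intro h <;> simp_all
theorem Items.wellFormed_iff : (is : Items) → (is.WellFormed ↔ is.WsOk ∧ WellFormedList is.values)
  | .nil => by simp [Items.WellFormed, Items.WsOk, Items.values, WellFormedList]
  | .cons _ item _ rest => by
    simp only [Items.WellFormed, Items.WsOk, Items.values, WellFormedList, Layout.wellFormed_iff item, Items.wellFormed_iff rest]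
    constructor <;> intro h <;> simp_all
theorem Members.wellFormed_iff : (ms : Members) → (ms.WellFormed ↔ ms.WsOk ∧ WellFormedMembers ms.values)
  | .nil => by simp [Members.WellFormed, Members.WsOk, Members.values, WellFormedMembers]
  | .cons _ _ _ _ val _ rest => by
    simp only [Members.WellFormed, Members.WsOk, Members.values, WellFormedMembers, Layout.wellFormed_iff val, Members.wellFormed_iff rest]
    constructor <;> intro h <;> simp_all
end

/-- A number, `true`, `false` or `null` (what jsmn calls a primitive). -/
def Value.isPrimitive : Value → Bool
  | .null | .true | .false | .number _ => Bool.true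
  | _ => Bool.false
/-- The layout of a number, `true`, `false` or `null`. -/
def Layout.isPrimitive : Layout → Bool
  | .null | .true | .false | .number _ => Bool.true
  | _ => Bool.false
/-- The layout of an array or object. -/
def Layout.isContainer : Layout → Bool
  | .array _ _ | .object _ _ => Bool.true
  | _ => Bool.false
theorem Layout.value_isPrimitive (l : Layout) : l.value.isPrimitive = l.isPrimitive := by cases l <;> rfl

/-- **`text` is a rendering of the value `v`**, with no whitespace around it (the `value` of §3). -/
def PrintsV (v : Value) (text : List UInt8) : Prop := ∃ l : Layout, l.WsOk ∧ l.value = v ∧ l.text = text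

/-- **`text` is a JSON text whose value is `v`** (§2: `JSON-text = ws value ws`). -/
def Prints (v : Value) (text : List UInt8) : Prop :=
  ∃ (w1 : List UInt8) (l : Layout) (w2 : List UInt8), IsWs w1 ∧ IsWs w2 ∧ l.WsOk ∧ l.value = v ∧ text = w1 ++ l.text ++ w2

/-- A well-formed layout between whitespace is a JSON text. -/
theorem Prints.of_layout {w1 : List UInt8} {l : Layout} {w2 text : List UInt8} (h1 : IsWs w1) (h2 : IsWs w2) (wf : l.WellFormed)
    (e : w1 ++ l.text ++ w2 = text) : Prints l.value text :=
  ⟨w1, l, w2, h1, h2, ((Layout.wellFormed_iff l).mp wf).1, rfl, e.symm⟩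

end Json
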